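-- pv_equiv track=rewrite | github.com/woyouqian/pythonworld | NonProject/calculator.py | str_dealing
-- ===== SOURCE A (Python) =====
-- def str_dealing(chars):
--     if chars:
--         _data = ''
--         for i in range(1, len(chars) + 1):
--             char = chars[0 - i]
--             if char not in ('+', '-', '*', '/'):
--                 _data += char
--             else:
--                 break
--
--     else:
--         return
--     var_key = str_reversed(_data)
--     other = chars.rstrip(var_key)
--     return [other, var_key]
--
-- def str_reversed(chars):
--     count = len(chars)
--     string = ''
--     if count != 0:
--         for i in range(1, count+1):
--             char = chars[count-i]
--             string += char
--     return string
-- ===== SOURCE B (Python) =====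
-- def str_dealing(chars):
--     if not chars:
--         return None
--     last = max(chars.rfind(c) for c in '+-*/')
--     var_key = chars[last + 1:]
--     return [chars.rstrip(var_key), var_key]
-- ===== Notes on version B (the rewrite author's own statement) =====
-- stated objective: simpler
-- what changed: Replaces the character-by-character reverse scan plus the hand-written str_reversed helper with a direct computation of the last operator position via rfind and a single slice.
import Mathlib
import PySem

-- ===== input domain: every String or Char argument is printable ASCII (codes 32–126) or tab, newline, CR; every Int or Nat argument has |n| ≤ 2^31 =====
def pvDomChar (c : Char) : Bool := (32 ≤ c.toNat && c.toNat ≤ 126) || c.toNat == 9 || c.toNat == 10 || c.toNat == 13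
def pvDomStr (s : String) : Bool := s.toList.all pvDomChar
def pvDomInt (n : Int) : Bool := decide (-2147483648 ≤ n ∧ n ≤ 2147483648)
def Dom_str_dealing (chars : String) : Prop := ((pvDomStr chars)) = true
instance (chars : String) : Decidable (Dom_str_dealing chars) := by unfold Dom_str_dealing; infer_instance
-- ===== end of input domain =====

-- B replaces A's character-by-character reverse scan (and its str_reversed helper) by locating
-- the last operator with rfind and slicing; objective: simpler. Same return value on every input.

-- Python's s.rstrip(set) has no PySem primitive: exact hand port — drop trailing characters that
-- are members of `strip` (rstrip('') drops nothing, as in Python); both Pythons call this builtin.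
def pvRstripChars (cs strip : List Char) : List Char :=
  (cs.reverse.dropWhile (fun c => strip.contains c)).reverse

-- ===== PORT A =====
-- the `for i in range(1, len+1)` loop with its `break`: recursion on i
def str_dealing_loop (cs : List Char) (i : Nat) (data : List Char) : List Char :=
  if i ≤ cs.length then
    let char := PySem.List.pyGetD cs (0 - (i : Int)) ' '
    if ¬ (char = '+' ∨ char = '-' ∨ char = '*' ∨ char = '/') then
      str_dealing_loop cs (i + 1) (data ++ [char])
    else data
  else data
termination_by cs.length + 1 - i

-- helper str_reversed from A's module
def str_reversed_port (cs : List Char) : List Char :=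
  let count := cs.length
  if count ≠ 0 then
    (PySem.List.pyRange 1 ((count : Int) + 1) 1).foldl
      (fun s i => s ++ [PySem.List.pyGetD cs ((count : Int) - i) ' ']) []
  else []

def str_dealing (chars : String) : Option (List String) :=
  let cs := chars.toList
  if cs ≠ [] then
    let _data := str_dealing_loop cs 1 []
    let var_key := str_reversed_port _data
    let other := pvRstripChars cs var_key
    some [String.ofList other, String.ofList var_key]
  else none

-- ===== PORT B =====
def str_dealing_alt (chars : String) : Option (List String) :=
  let cs := chars.toList
  if cs = [] then none
  else
    -- last = max(chars.rfind(c) for c in '+-*/')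
    let last := max (max (max (PySem.Chars.rfind cs ['+']) (PySem.Chars.rfind cs ['-']))
                        (PySem.Chars.rfind cs ['*'])) (PySem.Chars.rfind cs ['/'])
    let var_key := PySem.List.slice cs (some (last + 1)) none
    some [String.ofList (pvRstripChars cs var_key), String.ofList var_key]

-- ===== PRECONDITION & SPEC =====
def Spec_str_dealing (chars : String) (out : Option (List String)) : Prop := out = str_dealing_alt chars
instance (chars : String) (out : Option (List String)) : Decidable (Spec_str_dealing chars out) := by unfold Spec_str_dealing; infer_instance

-- ===== CLAIM (what is proved, stated in full; the proofs are below) =====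
def Claim_equal_str_dealing : Prop := ∀ (chars : String), Dom_str_dealing chars → Spec_str_dealing chars (str_dealing chars)

-- ===== LEMMAS AND PROOFS =====

-- the operator test, proof-side shorthand
def pvOp (c : Char) : Bool := c = '+' || c = '-' || c = '*' || c = '/'

-- A's loop collects the maximal non-operator run of the reversed string
lemma str_dealing_loop_eq (cs : List Char) (i : Nat) (data : List Char) (hi : 1 ≤ i) :
    str_dealing_loop cs i data = data ++ (cs.reverse.drop (i - 1)).takeWhile (fun c => !pvOp c) := by
  revert hi
  induction i, data using str_dealing_loop.induct (cs := cs) with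
  | case1 i data hle char hnot ih =>
    intro hi
    have h1 : i - 1 < cs.reverse.length := by rw [List.length_reverse]; omega
    have hii : i - 1 + 1 = i := by omega
    have hdrop : cs.reverse.drop (i - 1) = cs.reverse[i-1] :: cs.reverse.drop i := by
      rw [List.drop_eq_getElem_cons h1, hii]
    have hc : char = cs.reverse[i-1] := by
      show PySem.List.pyGetD cs (0 - (i : Int)) ' ' = _
      have h0 : (0 : Int) - (i : Int) = -(i : Int) := by ring
      rw [h0, PySem.List.pyGetD_neg_natCast cs i ' ' (by omega) hle]
      rw [List.getElem_reverse]; congr 1; omega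
    rw [str_dealing_loop]
    simp only [hle, if_pos]
    rw [if_pos hnot]
    rw [ih (by omega), hdrop]
    have hop : pvOp cs.reverse[i-1] = false := by
      rw [hc] at hnot; simp only [pvOp, List.getElem_reverse]
      simp only [List.getElem_reverse] at hnot
      simp only [Bool.or_eq_false_iff, decide_eq_false_iff_not]
      tauto
    rw [hc, List.takeWhile_cons]
    simp only [hop, Bool.not_false, if_true, Nat.add_sub_cancel]
    rw [← hc]
    simp [List.append_assoc]
  | case2 i data hle char hop =>
    intro hi
    have h1 : i - 1 < cs.reverse.length := by rw [List.length_reverse]; omega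
    have hii : i - 1 + 1 = i := by omega
    have hdrop : cs.reverse.drop (i - 1) = cs.reverse[i-1] :: cs.reverse.drop i := by
      rw [List.drop_eq_getElem_cons h1, hii]
    have hc : char = cs.reverse[i-1] := by
      show PySem.List.pyGetD cs (0 - (i : Int)) ' ' = _
      have h0 : (0 : Int) - (i : Int) = -(i : Int) := by ring
      rw [h0, PySem.List.pyGetD_neg_natCast cs i ' ' (by omega) hle]
      rw [List.getElem_reverse]; congr 1; omega
    rw [str_dealing_loop]
    simp only [hle, if_pos]
    rw [if_neg hop]
    rw [not_not, hc] at hop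
    have hb : pvOp cs.reverse[i-1] = true := by
      simp only [pvOp, List.getElem_reverse] at hop ⊢
      simp only [Bool.or_eq_true, decide_eq_true_eq]
      tauto
    rw [hdrop, List.takeWhile_cons]
    simp only [hb, Bool.not_true]
    simp
  | case3 i data hgt =>
    intro hi
    rw [str_dealing_loop]
    have h0 : cs.reverse.drop (i-1) = [] := by
      apply List.drop_eq_nil_of_le; rw [List.length_reverse]; omega
    simp [h0]
    omega

-- str_reversed reverses its argument
lemma str_reversed_port_eq (cs : List Char) : str_reversed_port cs = cs.reverse := by
  unfold str_reversed_port
  by_cases h : cs.length = 0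
  · simp [List.eq_nil_of_length_eq_zero h]
  · simp only [h, if_pos, ne_eq, not_false_eq_true]
    rw [PySem.List.foldl_append_singleton_eq_map]
    rw [PySem.List.pyRange_one]
    have hlen : ((cs.length : Int) + 1 - 1).toNat = cs.length := by omega
    rw [hlen, List.map_map]
    apply List.ext_getElem
    · simp
    · intro n h1 h2
      simp only [List.nil_append, List.getElem_map, Function.comp_apply, List.getElem_range]
      have hn : n < cs.length := by simpa using h1
      have : (cs.length : Int) - (1 + (n : Int)) = ((cs.length - 1 - n : Nat) : Int) := by omega
      rw [this, PySem.List.pyGetD_natCast]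
      rw [List.getElem_reverse]
      rw [List.getD_eq_getElem]

-- a one-character prefix is a statement about head?
lemma singleton_isPrefixOf (c : Char) (l : List Char) : [c].isPrefixOf l = true ↔ l.head? = some c := by
  cases l with
  | nil => simp [List.isPrefixOf]
  | cons a t => simp [List.isPrefixOf]; exact eq_comm

-- rfind.go with a single-character needle: -1 and no occurrence up to k, or the highest occurrence ≤ k
lemma rfind_go_char (s : List Char) (c : Char) (k : Nat) :
    (PySem.Chars.rfind.go s [c] k = -1 ∧ ∀ j ≤ k, s[j]? ≠ some c) ∨
    (∃ j : Nat, PySem.Chars.rfind.go s [c] k = (j : Int) ∧ j ≤ k ∧ s[j]? = some c ∧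
      ∀ i, j < i → i ≤ k → s[i]? ≠ some c) := by
  induction k with
  | zero =>
    unfold PySem.Chars.rfind.go
    by_cases h : [c].isPrefixOf s = true
    · right; refine ⟨0, ?_, le_refl _, ?_, ?_⟩
      · simp [h]
      · rw [singleton_isPrefixOf] at h; rw [← List.head?_drop]; simpa using h
      · intro i hi hle; omega
    · left
      constructor
      · simp [h]
      · intro j hj
        interval_cases j
        intro hcon
        apply h
        rw [singleton_isPrefixOf]
        rw [← List.head?_drop] at hcon
        simpa using hcon
  | succ k ih =>
    unfold PySem.Chars.rfind.go
    by_cases h : [c].isPrefixOf (s.drop (k+1)) = true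
    · right
      refine ⟨k+1, by simp [h], le_refl _, ?_, ?_⟩
      · rw [singleton_isPrefixOf, List.head?_drop] at h; exact h
      · intro i hi hle; omega
    · have hk1 : s[k+1]? ≠ some c := by
        intro hcon
        apply h
        rw [singleton_isPrefixOf, List.head?_drop]
        exact hcon
      rcases ih with ⟨h1, h2⟩ | ⟨j, h1, h2, h3, h4⟩
      · left
        refine ⟨by simpa [h] using h1, ?_⟩
        intro j hj
        rcases Nat.lt_or_ge j (k+1) with hlt | hge
        · exact h2 j (by omega)
        · have : j = k+1 := by omega
          rw [this]; exact hk1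
      · right
        refine ⟨j, by simpa [h] using h1, by omega, h3, ?_⟩
        intro i hlt hle
        rcases Nat.lt_or_ge i (k+1) with h5 | h5
        · exact h4 i hlt (by omega)
        · have : i = k+1 := by omega
          rw [this]; exact hk1

-- the element just after the takeWhile run fails the predicate
lemma takeWhile_getElem_fail {α : Type} (p : α → Bool) (l : List α)
    (h : (l.takeWhile p).length < l.length) : p (l[(l.takeWhile p).length]) = false := by
  induction l with
  | nil => simp at h
  | cons a t ih =>
    by_cases hp : p a
    · simp only [List.takeWhile_cons, hp, if_true] at h ⊢
      simpa using ih (by simpa using h)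
    · simp only [List.takeWhile_cons, hp] at h ⊢
      simpa using hp

-- upper bound: an operator character occurs nowhere above cs.length - 1 - k
lemma rfind_op_le (cs : List Char) (c : Char) (k : Nat) (hkN : k ≤ cs.length)
    (hO1 : ∀ m : Nat, (hm : m < cs.length) → cs.length - k ≤ m → pvOp cs[m] = false)
    (hc : pvOp c = true) :
    PySem.Chars.rfind cs [c] ≤ (cs.length : Int) - 1 - (k : Int) := by
  show PySem.Chars.rfind.go cs [c] cs.length ≤ _
  rcases rfind_go_char cs c cs.length with ⟨h1, _⟩ | ⟨j, h1, hj, hocc, _⟩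
  · rw [h1]; omega
  · rw [h1]
    have hjlt : j < cs.length := by
      by_contra hge
      rw [List.getElem?_eq_none (by omega)] at hocc
      simp at hocc
    have hopj : pvOp cs[j] = true := by
      rw [List.getElem?_eq_getElem hjlt] at hocc
      have : cs[j] = c := by simpa using hocc
      rw [this]; exact hc
    by_cases h2 : cs.length - k ≤ j
    · rw [hO1 j hjlt h2] at hopj; simp at hopj
    · omega

-- exact value: when the character at the last-operator position is c, rfind finds it
lemma rfind_op_eq (cs : List Char) (c : Char) (k : Nat) (hk : k < cs.length)
    (hc2 : cs[cs.length - 1 - k]'(by omega) = c)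
    (hO1 : ∀ m : Nat, (hm : m < cs.length) → cs.length - k ≤ m → pvOp cs[m] = false)
    (hc : pvOp c = true) :
    PySem.Chars.rfind cs [c] = (cs.length : Int) - 1 - (k : Int) := by
  have hle := rfind_op_le cs c k (by omega) hO1 hc
  have hsome : cs[cs.length - 1 - k]? = some c := by
    rw [List.getElem?_eq_getElem (by omega)]
    simpa using hc2
  unfold PySem.Chars.rfind at hle
  show PySem.Chars.rfind.go cs [c] cs.length = _
  rcases rfind_go_char cs c cs.length with ⟨h1, h2⟩ | ⟨j, h1, hj, hocc, h4⟩
  · exact absurd hsome (h2 _ (by omega))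
  · rw [h1] at hle ⊢
    have hge : cs.length - 1 - k ≤ j := by
      by_contra hlt
      exact h4 (cs.length - 1 - k) (by omega) (by omega) hsome
    omega

-- rfind is never below -1
lemma rfind_ge_neg_one (cs : List Char) (c : Char) : -1 ≤ PySem.Chars.rfind cs [c] := by
  show -1 ≤ PySem.Chars.rfind.go cs [c] cs.length
  rcases rfind_go_char cs c cs.length with ⟨h1, _⟩ | ⟨j, h1, _, _, _⟩
  · rw [h1]
  · rw [h1]; omega

theorem str_dealing_spec : Claim_equal_str_dealing := by
  intro chars _
  unfold Spec_str_dealing str_dealing str_dealing_alt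
  set cs := chars.toList with hcs
  by_cases hnil : cs = []
  · simp [hnil]
  · simp only [hnil, ne_eq, not_false_eq_true, if_true]
    -- notation
    set N := cs.length with hN
    set r := cs.reverse with hr
    set t := r.takeWhile (fun c => !pvOp c) with ht
    set k := t.length with hk
    have hkN : k ≤ N := by
      have h := (List.takeWhile_prefix (fun c => !pvOp c) (l := r)).length_le
      rw [hr, List.length_reverse] at h
      rw [hk, ht, hN]
      exact h
    have htake : t = r.take k := by
      rw [hk]; exact List.prefix_iff_eq_take.mp (List.takeWhile_prefix _)
    -- A's data is t, reversed it is cs.drop (N - k)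
    have hA : str_dealing_loop cs 1 [] = t := by
      rw [str_dealing_loop_eq cs 1 [] (le_refl 1)]
      simp [ht, hr]
    have htrev : t.reverse = cs.drop (N - k) := by
      rw [htake, List.reverse_take]
      simp [hr, hN]
    -- positions at or above N - k hold no operator
    have hO1 : ∀ m : Nat, (hm : m < cs.length) → cs.length - k ≤ m → pvOp cs[m] = false := by
      intro m hm hge
      have hmN : m < N := by omega
      have hgek : N - k ≤ m := by omega
      have hjr : N - 1 - m < r.length := by rw [hr, List.length_reverse]; omega
      have h5 : t[N - 1 - m]? = some (cs[m]'hm) := by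
        rw [htake, List.getElem?_take_of_lt (by omega), List.getElem?_eq_getElem hjr]
        congr 1
        simp only [hr, List.getElem_reverse]
        congr 1
        omega
      have hmem : (cs[m]'hm) ∈ t := List.mem_of_getElem? h5
      rw [ht] at hmem
      have h6 := List.mem_takeWhile_imp hmem
      simpa using h6
    -- the four rfinds and their maximum
    have hub : ∀ c : Char, pvOp c = true →
        PySem.Chars.rfind cs [c] ≤ (N : Int) - 1 - (k : Int) :=
      fun c hc => rfind_op_le cs c k hkN hO1 hc
    have hlast : max (max (max (PySem.Chars.rfind cs ['+']) (PySem.Chars.rfind cs ['-']))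
          (PySem.Chars.rfind cs ['*'])) (PySem.Chars.rfind cs ['/']) = (N : Int) - 1 - (k : Int) := by
      have h1 := hub '+' (by decide)
      have h2 := hub '-' (by decide)
      have h3 := hub '*' (by decide)
      have h4 := hub '/' (by decide)
      have hMle : max (max (max (PySem.Chars.rfind cs ['+']) (PySem.Chars.rfind cs ['-']))
          (PySem.Chars.rfind cs ['*'])) (PySem.Chars.rfind cs ['/']) ≤ (N : Int) - 1 - (k : Int) := by
        simp only [max_le_iff]
        exact ⟨⟨⟨h1, h2⟩, h3⟩, h4⟩
      rcases Nat.lt_or_ge k N with hkn | hkn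
      · -- an operator exists at position N - 1 - k
        have hkr : k < r.length := by rw [hr, List.length_reverse]; omega
        have hfail := takeWhile_getElem_fail (fun c => !pvOp c) r hkr
        have hopk : pvOp (r[k]'hkr) = true := by simpa using hfail
        have hNk : N - 1 - k < cs.length := by omega
        have hkcs : k < cs.length := by omega
        have hcs : cs[N - 1 - k]'hNk = r[k]'hkr := by
          simp only [hr, List.getElem_reverse]
          congr 1
        rw [← hcs] at hopk
        have hops := hopk
        simp only [pvOp, Bool.or_eq_true, decide_eq_true_eq] at hops
        have hex : PySem.Chars.rfind cs ['+'] = (N : Int) - 1 - (k : Int) ∨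
            PySem.Chars.rfind cs ['-'] = (N : Int) - 1 - (k : Int) ∨
            PySem.Chars.rfind cs ['*'] = (N : Int) - 1 - (k : Int) ∨
            PySem.Chars.rfind cs ['/'] = (N : Int) - 1 - (k : Int) := by
          rcases hops with ((hc0 | hc0) | hc0) | hc0
          · exact Or.inl (rfind_op_eq cs '+' k hkcs hc0 hO1 (by decide))
          · exact Or.inr (Or.inl (rfind_op_eq cs '-' k hkcs hc0 hO1 (by decide)))
          · exact Or.inr (Or.inr (Or.inl (rfind_op_eq cs '*' k hkcs hc0 hO1 (by decide))))
          · exact Or.inr (Or.inr (Or.inr (rfind_op_eq cs '/' k hkcs hc0 hO1 (by decide))))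
        have hMge : (N : Int) - 1 - (k : Int) ≤ max (max (max (PySem.Chars.rfind cs ['+'])
            (PySem.Chars.rfind cs ['-'])) (PySem.Chars.rfind cs ['*'])) (PySem.Chars.rfind cs ['/']) := by
          simp only [le_max_iff]
          omega
        omega
      · -- no operator anywhere: k = N, everything is -1
        have hkn' : k = N := by omega
        have hg := rfind_ge_neg_one cs '/'
        have hMge : (-1 : Int) ≤ max (max (max (PySem.Chars.rfind cs ['+'])
            (PySem.Chars.rfind cs ['-'])) (PySem.Chars.rfind cs ['*'])) (PySem.Chars.rfind cs ['/']) := by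
          simp only [le_max_iff]
          omega
        omega
    -- finish: both sides are the same pair
    rw [hA, str_reversed_port_eq, htrev, hlast]
    have hcast : (N : Int) - 1 - (k : Int) + 1 = ((N - k : Nat) : Int) := by omega
    rw [hcast, PySem.List.slice_from_natCast]
    simp
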